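-- pv_equiv track=rewrite | github.com/kevalrajpalknight/CompetitiveProgramming | GeeksforGeeks/Sums of i-th row and i-th column/solution.py | sumOfRowCol
-- ===== SOURCE A (Python) =====
-- def sumOfRowCol(N,M,A):
--     flag = True
--     n = min(N,M)
--
--     for i in range(n):
--         row_sum, col_sum = 0,0
--         for row_index in range(N):
--              row_sum += A[row_index][i]
--         for col_index in range(M):
--              col_sum += A[i][col_index]
--         if row_sum != col_sum:
--            flag = False
--     if flag:
--         return 1
--     else:
--         return 0
-- ===== SOURCE B (Python) =====
-- def sumOfRowCol(N, M, A):
--     n = min(N, M)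
--     if n <= 0:
--         return 1
--     rowsum = []
--     colsum = [0] * M
--     for row in A:
--         rowsum.append(sum(row))
--         for c, x in enumerate(row):
--             colsum[c] += x
--     return 1 if all(rowsum[i] == colsum[i] for i in range(n)) else 0
-- ===== Notes on version B (the rewrite author's own statement) =====
-- stated objective: simpler
-- what changed: B makes one pass over the matrix building rowsum and colsum tables and then compares the first min(N,M) entries in a separate pass, instead of re-scanning a full column and a full row for every index as A does.
-- outside the precondition, e.g. on sumOfRowCol(1, 1, [[0], [5]]): A returns 1, B returns 0
import Mathlib
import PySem

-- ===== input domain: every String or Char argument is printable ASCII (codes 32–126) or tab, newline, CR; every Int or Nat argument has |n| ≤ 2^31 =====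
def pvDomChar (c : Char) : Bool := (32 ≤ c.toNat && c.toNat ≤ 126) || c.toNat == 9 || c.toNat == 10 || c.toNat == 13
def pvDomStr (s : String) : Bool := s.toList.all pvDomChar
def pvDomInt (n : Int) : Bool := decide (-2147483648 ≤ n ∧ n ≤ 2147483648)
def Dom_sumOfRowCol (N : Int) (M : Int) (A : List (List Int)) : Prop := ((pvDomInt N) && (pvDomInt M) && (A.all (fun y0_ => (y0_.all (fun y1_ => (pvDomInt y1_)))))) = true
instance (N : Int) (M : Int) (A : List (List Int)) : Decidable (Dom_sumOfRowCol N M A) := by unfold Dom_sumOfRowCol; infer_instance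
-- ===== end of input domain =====

-- B builds rowsum/colsum tables in one pass over the matrix and compares them in a
-- separate pass, instead of A's per-index full row and column re-scans (objective: simpler).


-- ===== PORT A =====
def sumOfRowCol (N : Int) (M : Int) (A : List (List Int)) : Int :=
  let n := min N M
  let flag := (PySem.List.pyRange 0 n 1).foldl (fun flag i =>
    let row_sum := (PySem.List.pyRange 0 N 1).foldl
      (fun s ri => s + PySem.List.pyGetD (PySem.List.pyGetD A ri []) i 0) 0
    let col_sum := (PySem.List.pyRange 0 M 1).foldl
      (fun s ci => s + PySem.List.pyGetD (PySem.List.pyGetD A i []) ci 0) 0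
    if row_sum ≠ col_sum then false else flag) true
  if flag then 1 else 0

-- ===== PORT B =====
-- `colsum[c] += x` for each (c, x) of a row; exact when the row is no longer than colsum
-- (guaranteed by Pre_, under which every row has exactly M entries).
def pvAddRow : List Int → List Int → List Int
  | cs, [] => cs
  | [], _ => []
  | c :: cs, x :: xs => (c + x) :: pvAddRow cs xs

def sumOfRowCol_alt (N : Int) (M : Int) (A : List (List Int)) : Int :=
  let n := min N M
  if n ≤ 0 then 1
  else
    let p := A.foldl (fun (p : List Int × List Int) row =>
      (p.1 ++ [row.sum], pvAddRow p.2 row)) ([], List.replicate M.toNat 0)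
    if (PySem.List.pyRange 0 n 1).all
        (fun i => PySem.List.pyGetD p.1 i 0 == PySem.List.pyGetD p.2 i 0) then 1 else 0

-- ===== PRECONDITION & SPEC =====
-- Pre_ excludes inputs with min(N,M) > 0 where A is not a proper N×M matrix: there A either
-- raises IndexError or returns a value read off an accidental prefix of the ragged rows.
def Pre_sumOfRowCol (N : Int) (M : Int) (A : List (List Int)) : Prop :=
  min N M ≤ 0 ∨ (A.length = N.toNat ∧ ∀ row ∈ A, row.length = M.toNat)
instance (N : Int) (M : Int) (A : List (List Int)) : Decidable (Pre_sumOfRowCol N M A) := by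
  unfold Pre_sumOfRowCol; infer_instance

def pvWitness_sumOfRowCol : Int × Int × List (List Int) := (2, 2, [[1, 2], [2, 1]])

def Spec_sumOfRowCol (N : Int) (M : Int) (A : List (List Int)) (out : Int) : Prop := out = sumOfRowCol_alt N M A
instance (N : Int) (M : Int) (A : List (List Int)) (out : Int) : Decidable (Spec_sumOfRowCol N M A out) := by unfold Spec_sumOfRowCol; infer_instance

-- ===== CLAIM (what is proved, stated in full; the proofs are below) =====
def Claim_equal_sumOfRowCol : Prop := ∀ (N : Int) (M : Int) (A : List (List Int)), Dom_sumOfRowCol N M A → Pre_sumOfRowCol N M A → Spec_sumOfRowCol N M A (sumOfRowCol N M A)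

-- ===== LEMMAS AND PROOFS =====

-- A's flag loop is an `all` over the range.
theorem pv_flag_foldl (l : List Int) (f g : Int → Int) (b : Bool) :
    l.foldl (fun flag i => if f i ≠ g i then false else flag) b
      = (b && l.all (fun i => f i == g i)) := by
  induction l generalizing b with
  | nil => simp
  | cons i l ih =>
      simp only [List.foldl_cons, List.all_cons, ih]
      by_cases h : f i = g i <;> simp [h]

-- B's pair fold splits into the two independent folds.
theorem pv_pair_foldl (A : List (List Int)) (r cs : List Int) :
    A.foldl (fun (p : List Int × List Int) row =>
        (p.1 ++ [row.sum], pvAddRow p.2 row)) (r, cs)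
      = (A.foldl (fun r row => r ++ [row.sum]) r, A.foldl pvAddRow cs) := by
  induction A generalizing r cs with
  | nil => rfl
  | cons row A ih => simp [List.foldl_cons, ih]

theorem pv_all_congr_mem (l : List Int) (f g : Int → Bool)
    (h : ∀ a ∈ l, f a = g a) : l.all f = l.all g := by
  induction l with
  | nil => rfl
  | cons a l ih =>
      simp only [List.all_cons, h a List.mem_cons_self,
        ih fun x hx => h x (List.mem_cons_of_mem a hx)]

theorem pvAddRow_length (cs row : List Int) (h : row.length = cs.length) :
    (pvAddRow cs row).length = cs.length := by
  induction cs generalizing row with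
  | nil => cases row <;> simp [pvAddRow]
  | cons c cs ih =>
      cases row with
      | nil => simp [pvAddRow]
      | cons x xs =>
          simp only [pvAddRow, List.length_cons] at h ⊢
          rw [ih xs (by omega)]

theorem pvAddRow_getD (cs row : List Int) (h : row.length = cs.length) (j : Nat) :
    (pvAddRow cs row).getD j 0 = cs.getD j 0 + row.getD j 0 := by
  induction cs generalizing row j with
  | nil =>
      cases row with
      | nil => simp [pvAddRow]
      | cons x xs => simp at h
  | cons c cs ih =>
      cases row with
      | nil => simp at h
      | cons x xs =>
          cases j with
          | zero => simp [pvAddRow]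
          | succ j =>
              simp only [pvAddRow, List.getD_cons_succ]
              exact ih xs (by simpa using h) j

-- Entry j of the accumulated column sums.
theorem pv_colfold_getD (A : List (List Int)) (cs : List Int)
    (h : ∀ row ∈ A, row.length = cs.length) (j : Nat) :
    (A.foldl pvAddRow cs).getD j 0
      = cs.getD j 0 + (A.map (fun row => row.getD j 0)).sum := by
  induction A generalizing cs with
  | nil => simp
  | cons row A ih =>
      have hr : row.length = cs.length := h row List.mem_cons_self
      have hlen : (pvAddRow cs row).length = cs.length := pvAddRow_length cs row hr
      rw [List.foldl_cons, ih (pvAddRow cs row)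
            (fun r hrA => (h r (List.mem_cons_of_mem row hrA)).trans hlen.symm),
          pvAddRow_getD cs row hr, List.map_cons, List.sum_cons]
      ring

theorem sumOfRowCol_eq (N M : Int) (A : List (List Int)) (h : Pre_sumOfRowCol N M A) :
    sumOfRowCol N M A = sumOfRowCol_alt N M A := by
  unfold sumOfRowCol sumOfRowCol_alt
  dsimp only []
  by_cases hn : min N M ≤ 0
  · rw [PySem.List.pyRange_one_eq_nil hn]
    simp [hn]
  · rcases h with hle | ⟨hlen, hrow⟩
    · exact absurd hle hn
    rw [if_neg hn, pv_pair_foldl]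
    have hminN : min N M ≤ N := min_le_left N M
    have hminM : min N M ≤ M := min_le_right N M
    have hNA : (A.length : Int) = N := by omega
    simp only [pv_flag_foldl, Bool.true_and]
    have hall : (PySem.List.pyRange 0 (min N M) 1).all (fun i =>
          (PySem.List.pyRange 0 N 1).foldl
            (fun s ri => s + PySem.List.pyGetD (PySem.List.pyGetD A ri []) i 0) 0
          == (PySem.List.pyRange 0 M 1).foldl
            (fun s ci => s + PySem.List.pyGetD (PySem.List.pyGetD A i []) ci 0) 0)
        = (PySem.List.pyRange 0 (min N M) 1).all (fun i =>
          PySem.List.pyGetD (A.foldl (fun r row => r ++ [row.sum]) []) i 0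
          == PySem.List.pyGetD (A.foldl pvAddRow (List.replicate M.toNat 0)) i 0) := by
      apply pv_all_congr_mem
      intro i hi
      rw [PySem.List.mem_pyRange_one] at hi
      obtain ⟨k, rfl⟩ : ∃ k : Nat, i = (k : Int) := ⟨i.toNat, (Int.toNat_of_nonneg hi.1).symm⟩
      have hkN : k < A.length := by omega
      have hkM : k < M.toNat := by omega
      -- A's inner column scan: sum of column k
      have hcol : (PySem.List.pyRange 0 N 1).foldl
            (fun s ri => s + PySem.List.pyGetD (PySem.List.pyGetD A ri []) (k : Int) 0) 0
          = (A.map (fun row => row.getD k 0)).sum := by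
        rw [← hNA, PySem.List.foldl_pyRange_zero_pyGetD' A []
              (fun s row => s + PySem.List.pyGetD row (k : Int) 0) 0,
            PySem.List.foldl_congr_mem A _ (fun s row => s + row.getD k 0) 0
              (fun acc row _ => by rw [PySem.List.pyGetD_natCast]),
            PySem.List.foldl_add]
        simp
      -- A's inner row scan: sum of row k
      have hrowk : (PySem.List.pyRange 0 M 1).foldl
            (fun s ci => s + PySem.List.pyGetD (PySem.List.pyGetD A (k : Int) []) ci 0) 0
          = A[k].sum := by
        rw [PySem.List.pyGetD_natCast, List.getD_eq_getElem A [] hkN]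
        have hMl : (M : Int) = ((A[k].length : Nat) : Int) := by
          have := hrow A[k] (List.getElem_mem hkN); omega
        rw [hMl, PySem.List.foldl_pyRange_zero_pyGetD' A[k] 0 (fun s x => s + x) 0,
            PySem.List.foldl_add]
        simp [List.sum_eq_foldl]
      -- B's tables
      have hp1 : PySem.List.pyGetD (A.foldl (fun r row => r ++ [row.sum]) []) (k : Int) 0
          = A[k].sum := by
        rw [PySem.List.foldl_append_singleton_eq_map, PySem.List.pyGetD_natCast,
            List.nil_append, List.getD_eq_getElem _ 0 (by simpa using hkN), List.getElem_map]
      have hp2 : PySem.List.pyGetD (A.foldl pvAddRow (List.replicate M.toNat 0)) (k : Int) 0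
          = (A.map (fun row => row.getD k 0)).sum := by
        rw [PySem.List.pyGetD_natCast,
            pv_colfold_getD A _ (fun r hr => by simp [hrow r hr]) k]
        simp
      rw [hcol, hrowk, hp1, hp2]
      exact Bool.beq_comm
    rw [hall]

-- ===== VERDICT (by name: the statement is the Claim_ definition above) =====
theorem sumOfRowCol_spec : Claim_equal_sumOfRowCol := by
  intro N M A _ hpre
  exact sumOfRowCol_eq N M A hpre
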